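-- pv_equiv track=rewrite | github.com/jatin-gandhi/resource-wise | backend/app/services/response_formatter.py | _get_key_fields
-- ===== SOURCE A (Python) =====
-- def _get_key_fields(columns: list[str]) -> list[str]:
--     """Determine key fields to display based on column names."""
--     # Priority order for common fields
--     priority_fields = [
--         "name",
--         "full_name",
--         "first_name",
--         "last_name",
--         "email",
--         "title",
--         "designation",
--         "department",
--         "skill_name",
--         "project_name",
--         "status",
--     ]
--
--     key_fields = []
--
--     # Add priority fields that exist
--     for field in priority_fields:
--         if field in columns:
--             key_fields.append(field)
--
--     # Add remaining fields
--     for col in columns: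
--         if col not in key_fields:
--             key_fields.append(col)
--
--     return key_fields
-- ===== SOURCE B (Python) =====
-- def _get_key_fields(columns: list[str]) -> list[str]:
--     """Determine key fields to display based on column names."""
--     priority_fields = [
--         "name",
--         "full_name",
--         "first_name",
--         "last_name",
--         "email",
--         "title",
--         "designation",
--         "department",
--         "skill_name",
--         "project_name",
--         "status",
--     ]
--     # Rank table: priority fields get their index, everything else the same
--     # past-the-end rank, so one stable sort puts priority fields first (in
--     # priority order) and keeps all other fields in first-occurrence order.
--     rank = {f: i for i, f in enumerate(priority_fields)}
--     return sorted(dict.fromkeys(columns), key=lambda c: rank.get(c, len(priority_fields)))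
-- ===== Notes on version B (the rewrite author's own statement) =====
-- stated objective: faster
-- what changed: Replaces A's two explicit scan/append passes (linear membership scans over columns and over the growing output) with an order-preserving dedup plus a single stable sort keyed by a priority-rank table, where non-priority fields share one past-the-end rank so stability keeps their first-occurrence order.
import Mathlib
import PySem

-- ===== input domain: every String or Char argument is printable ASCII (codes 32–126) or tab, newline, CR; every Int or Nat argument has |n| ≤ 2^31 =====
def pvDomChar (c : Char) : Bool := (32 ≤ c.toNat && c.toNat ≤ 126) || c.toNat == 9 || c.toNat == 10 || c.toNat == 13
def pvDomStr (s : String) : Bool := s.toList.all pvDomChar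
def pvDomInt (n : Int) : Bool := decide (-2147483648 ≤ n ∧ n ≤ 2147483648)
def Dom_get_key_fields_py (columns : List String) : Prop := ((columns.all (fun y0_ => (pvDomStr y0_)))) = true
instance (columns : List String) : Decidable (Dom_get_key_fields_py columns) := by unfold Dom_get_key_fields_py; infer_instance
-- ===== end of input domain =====

-- B replaces A's two quadratic scan/append passes with an order-preserving dedup
-- plus one stable sort keyed by a priority-rank table (non-priority fields share
-- one past-the-end rank, so stability keeps their first-occurrence order); the
-- timing run measured B faster.


-- ===== PORT A =====
def priorityFieldsA : List String :=
  ["name", "full_name", "first_name", "last_name", "email", "title",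
   "designation", "department", "skill_name", "project_name", "status"]

def get_key_fields_py (columns : List String) : List String :=
  -- first loop: add priority fields that exist
  let key_fields := priorityFieldsA.foldl
    (fun acc field => if field ∈ columns then acc ++ [field] else acc) []
  -- second loop: add remaining fields not already in key_fields
  columns.foldl (fun acc col => if col ∉ acc then acc ++ [col] else acc) key_fields

-- ===== PORT B =====
def priorityFieldsB : List String :=
  ["name", "full_name", "first_name", "last_name", "email", "title",
   "designation", "department", "skill_name", "project_name", "status"]

def get_key_fields_py_alt (columns : List String) : List String :=
  -- rank = {f: i for i, f in enumerate(priority_fields)}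
  let rank : PySem.Dict String Int :=
    (PySem.List.enumerate priorityFieldsB).foldl (fun d p => d.insert p.2 p.1) PySem.Dict.empty
  -- sorted(dict.fromkeys(columns), key=lambda c: rank.get(c, len(priority_fields)))
  PySem.List.sorted (PySem.List.dedup columns)
    (fun c => rank.getD c (priorityFieldsB.length : Int))

-- ===== PRECONDITION & SPEC =====
def Spec_get_key_fields_py (columns : List String) (out : List String) : Prop := out = get_key_fields_py_alt columns
instance (columns : List String) (out : List String) : Decidable (Spec_get_key_fields_py columns out) := by unfold Spec_get_key_fields_py; infer_instance

-- ===== CLAIM (what is proved, stated in full; the proofs are below) =====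
def Claim_equal_get_key_fields_py : Prop := ∀ (columns : List String), Dom_get_key_fields_py columns → Spec_get_key_fields_py columns (get_key_fields_py columns)

-- ===== LEMMAS AND PROOFS =====

-- ---- A side: characterise the two foldl passes ----

-- first-occurrence dedup of a list, skipping anything already "seen"
def dfo (seen : List String) : List String → List String
  | [] => []
  | c :: cs => if c ∈ seen then dfo seen cs else c :: dfo (c :: seen) cs

theorem dfo_congr (l : List String) (s t : List String)
    (h : ∀ c, c ∈ s ↔ c ∈ t) : dfo s l = dfo t l := by
  induction l generalizing s t with
  | nil => rfl
  | cons c cs ih =>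
    simp only [dfo]
    by_cases hc : c ∈ s
    · rw [if_pos hc, if_pos ((h c).mp hc)]; exact ih s t h
    · rw [if_neg hc, if_neg (fun hh => hc ((h c).mpr hh))]
      exact congrArg (c :: ·) (ih (c :: s) (c :: t) (by intro x; simp [h x]))

theorem foldl_dedup_eq (l : List String) (acc : List String) :
    l.foldl (fun acc col => if col ∉ acc then acc ++ [col] else acc) acc = acc ++ dfo acc l := by
  induction l generalizing acc with
  | nil => simp [dfo]
  | cons c cs ih =>
    simp only [List.foldl_cons]
    by_cases hc : c ∈ acc
    · rw [if_neg (by simp [hc]), ih, dfo, if_pos hc]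
    · rw [if_pos hc, ih, dfo, if_neg hc,
        dfo_congr cs (acc ++ [c]) (c :: acc) (by intro x; simp [or_comm])]
      simp

theorem set_ofList_eq_dfo (l : List String) (s : PySem.Set String) :
    l.foldl PySem.Set.add s = s ++ dfo s l := by
  induction l generalizing s with
  | nil => simp [dfo]
  | cons c cs ih =>
    simp only [List.foldl_cons, PySem.Set.add]
    by_cases hc : c ∈ s
    · rw [if_pos (by simp [hc]), ih, dfo, if_pos hc]
    · rw [if_neg (by simp [hc]), ih, dfo, if_neg hc,
        dfo_congr cs (s ++ [c]) (c :: s) (by intro x; simp [or_comm])]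
      simp

theorem dedup_eq_dfo (l : List String) : PySem.List.dedup l = dfo [] l := by
  rw [PySem.List.dedup_eq_ofList, PySem.Set.ofList_eq_foldl]
  simpa using set_ofList_eq_dfo l []

theorem dfo_filter (l : List String) (s t : List String)
    (h : ∀ c ∈ l, (c ∈ s ↔ c ∈ priorityFieldsB ∨ c ∈ t)) :
    dfo s l = (dfo t l).filter (fun c => !(decide (c ∈ priorityFieldsB))) := by
  induction l generalizing s t with
  | nil => rfl
  | cons c cs ih =>
    have hc := h c (by simp)
    simp only [dfo]
    by_cases hs : c ∈ s
    · rw [if_pos hs]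
      rcases (hc.mp hs) with hpr | ht
      · by_cases ht' : c ∈ t
        · rw [if_pos ht']; exact ih s t (fun x hx => h x (by simp [hx]))
        · rw [if_neg ht']
          simp only [List.filter_cons, hpr, decide_true, Bool.not_true, Bool.false_eq_true,
            if_false]
          exact ih s (c :: t) (by
            intro x hx
            constructor
            · intro hxs; rcases (h x (by simp [hx])).mp hxs with h1 | h2
              · exact Or.inl h1
              · exact Or.inr (by simp [h2])
            · intro hor; rcases hor with h1 | h2
              · exact (h x (by simp [hx])).mpr (Or.inl h1)
              · rcases List.mem_cons.mp h2 with rfl | h3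
                · exact hs
                · exact (h x (by simp [hx])).mpr (Or.inr h3))
      · rw [if_pos ht]; exact ih s t (fun x hx => h x (by simp [hx]))
    · have hnp : c ∉ priorityFieldsB := fun hpr => hs (hc.mpr (Or.inl hpr))
      have hnt : c ∉ t := fun ht => hs (hc.mpr (Or.inr ht))
      rw [if_neg hs, if_neg hnt]
      simp only [List.filter_cons, hnp, decide_false, Bool.not_false, if_true]
      refine congrArg (c :: ·) (ih (c :: s) (c :: t) ?_)
      intro x hx
      rcases eq_or_ne x c with rfl | hne
      · simp
      · simp only [List.mem_cons, hne, false_or]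
        exact h x (by simp [hx])

-- ---- B side: the rank key is the index in the priority list ----

theorem rankDict_eq : (PySem.List.enumerate priorityFieldsB).foldl (fun d p => d.insert p.2 p.1)
      (PySem.Dict.empty : PySem.Dict String Int)
    = PySem.Dict.mk [("name",0),("full_name",1),("first_name",2),("last_name",3),("email",4),
        ("title",5),("designation",6),("department",7),("skill_name",8),("project_name",9),
        ("status",10)] := by decide

set_option maxHeartbeats 2000000 in
theorem rank_getD (c : String) :
    ((PySem.List.enumerate priorityFieldsB).foldl (fun d p => d.insert p.2 p.1)
        (PySem.Dict.empty : PySem.Dict String Int)).getD c (priorityFieldsB.length : Int)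
    = (priorityFieldsB.idxOf c : Int) := by
  rw [rankDict_eq]
  simp only [PySem.Dict.getD, PySem.Dict.get?_mk_cons, priorityFieldsB, List.idxOf_cons,
    List.length_cons, List.length_nil]
  split_ifs <;> simp_all [List.idxOf, PySem.Dict.get?, Bool.cond_eq_ite, beq_iff_eq]

-- ---- B side: stable insertion sort by idxOf-rank = priority filter ++ rest ----

theorem insertBy_congr (bf1 bf2 : String → String → Bool) (x : String) (l : List String)
    (h : ∀ y ∈ l, bf1 x y = bf2 x y) :
    PySem.List.insertBy bf1 x l = PySem.List.insertBy bf2 x l := by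
  induction l with
  | nil => rfl
  | cons y ys ih =>
    show (if bf1 x y then _ else _) = (if bf2 x y then _ else _)
    rw [h y (by simp)]
    by_cases hb : bf2 x y
    · rw [if_pos hb, if_pos hb]
    · rw [if_neg hb, if_neg hb, ih (fun z hz => h z (by simp [hz]))]

theorem ins_filter (pf : List String) (q : String → Bool) (x : String) (N : List String)
    (hnd : pf.Nodup) (hx : x ∈ pf) (hqx : q x = false) (hN : ∀ y ∈ N, y ∉ pf) :
    PySem.List.insertBy (fun a b => decide (pf.idxOf a < pf.idxOf b)) x (pf.filter q ++ N)
      = pf.filter (fun f => q f || f == x) ++ N := by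
  induction pf with
  | nil => cases hx
  | cons p ps ih =>
    have hpn : p ∉ ps := (List.nodup_cons.mp hnd).1
    have hnd' : ps.Nodup := (List.nodup_cons.mp hnd).2
    rcases eq_or_ne x p with rfl | hxp
    · -- x is the head of pf: q x = false, everything in the tail list ranks after x
      have hfilt : ps.filter (fun f => q f || f == x) = ps.filter q := by
        apply List.filter_congr; intro f hf
        have : (f == x) = false := by
          simp only [beq_eq_false_iff_ne]; rintro rfl; exact hpn hf
        simp [this]
      simp only [List.filter_cons, hqx, beq_self_eq_true, Bool.true_or, Bool.or_true, if_true,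
        Bool.false_eq_true, if_false, hfilt]
      have hall : ∀ y ∈ ps.filter q ++ N,
          (fun a b => decide ((x::ps).idxOf a < (x::ps).idxOf b)) x y = true := by
        intro y hy
        have hyx : y ≠ x := by
          rcases List.mem_append.mp hy with h1 | h1
          · rintro rfl; exact hpn (List.mem_of_mem_filter h1)
          · rintro rfl; exact hN y h1 (by simp)
        have : (x::ps).idxOf y = ps.idxOf y + 1 := by
          simp [List.idxOf_cons, beq_eq_false_iff_ne, Ne.symm hyx]
        simp [List.idxOf_cons_self, this]
      cases hl : ps.filter q ++ N with
      | nil => simp [hl, PySem.List.insertBy]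
      | cons z zs =>
        rw [show PySem.List.insertBy (fun a b =>
              decide (List.idxOf a (x :: ps) < List.idxOf b (x :: ps))) x (z :: zs)
            = if (fun a b => decide (List.idxOf a (x :: ps) < List.idxOf b (x :: ps))) x z
              then x :: z :: zs
              else z :: PySem.List.insertBy (fun a b =>
                decide (List.idxOf a (x :: ps) < List.idxOf b (x :: ps))) x zs from rfl,
          if_pos (hall z (by simp [hl]))]
        simp [← hl]
    · -- x is in the tail: step over the head, shift ranks by one
      have hxps : x ∈ ps := by
        rcases List.mem_cons.mp hx with h | h
        · exact absurd h hxp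
        · exact h
      have hshift : ∀ y ∈ ps.filter q ++ N,
          (fun a b => decide ((p::ps).idxOf a < (p::ps).idxOf b)) x y
            = (fun a b => decide (ps.idxOf a < ps.idxOf b)) x y := by
        intro y hy
        have hyp : y ≠ p := by
          rcases List.mem_append.mp hy with h1 | h1
          · rintro rfl; exact hpn (List.mem_of_mem_filter h1)
          · rintro rfl; exact hN y h1 (by simp)
        have h1 : (p::ps).idxOf x = ps.idxOf x + 1 := by
          simp [List.idxOf_cons, beq_eq_false_iff_ne, Ne.symm hxp]
        have h2 : (p::ps).idxOf y = ps.idxOf y + 1 := by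
          simp [List.idxOf_cons, beq_eq_false_iff_ne, Ne.symm hyp]
        simp [h1, h2]
      have hN' : ∀ y ∈ N, y ∉ ps := fun y hy hm => hN y hy (by simp [hm])
      have hpx : (p == x) = false := by
        simp only [beq_eq_false_iff_ne]; exact fun h => hxp h.symm
      by_cases hqp : q p
      · -- head kept by the filter; x ranks after it
        have hxne : (p::ps).idxOf x ≠ 0 := by
          simp [List.idxOf_cons, beq_eq_false_iff_ne, Ne.symm hxp]
        simp only [List.filter_cons, hqp, hpx, Bool.true_or, if_true, List.cons_append]
        rw [show PySem.List.insertBy (fun a b =>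
              decide (List.idxOf a (p :: ps) < List.idxOf b (p :: ps))) x (p :: (ps.filter q ++ N))
            = if (fun a b => decide (List.idxOf a (p :: ps) < List.idxOf b (p :: ps))) x p
              then x :: p :: (ps.filter q ++ N)
              else p :: PySem.List.insertBy (fun a b =>
                decide (List.idxOf a (p :: ps) < List.idxOf b (p :: ps))) x (ps.filter q ++ N)
            from rfl,
          if_neg (by simp [List.idxOf_cons_self]),
          insertBy_congr _ (fun a b => decide (ps.idxOf a < ps.idxOf b)) x _ hshift,
          ih hnd' hxps hN']
      · simp only [List.filter_cons, hqp, hpx, Bool.false_or, Bool.false_eq_true, if_false]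
        rw [insertBy_congr _ (fun a b => decide (ps.idxOf a < ps.idxOf b)) x _ hshift,
          ih hnd' hxps hN']

theorem fold_ins (pf : List String) (hnd : pf.Nodup) :
    ∀ (l proc N : List String), l.Nodup → (∀ y ∈ N, y ∉ pf) → (∀ y ∈ l, y ∉ proc) →
    l.foldl (fun acc x => PySem.List.insertBy (fun a b => decide (pf.idxOf a < pf.idxOf b)) x acc)
        (pf.filter (fun f => decide (f ∈ proc)) ++ N)
      = pf.filter (fun f => decide (f ∈ proc) || decide (f ∈ l))
          ++ (N ++ l.filter (fun c => !decide (c ∈ pf))) := by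
  intro l
  induction l with
  | nil =>
    intro proc N _ _ _
    simp
  | cons x xs ih =>
    intro proc N hndl hN hproc
    have hxs : xs.Nodup := (List.nodup_cons.mp hndl).2
    have hxxs : x ∉ xs := (List.nodup_cons.mp hndl).1
    simp only [List.foldl_cons]
    by_cases hxpf : x ∈ pf
    · rw [ins_filter pf _ x N hnd hxpf (by simp [hproc x (by simp)]) hN]
      have hpred : pf.filter (fun f => decide (f ∈ proc) || f == x)
          = pf.filter (fun f => decide (f ∈ (x :: proc))) := by
        apply List.filter_congr; intro f _
        simp only [List.mem_cons]
        by_cases h : f = x <;> simp [h, Bool.or_comm]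
      rw [hpred, ih (x :: proc) N hxs hN
        (by intro y hy; simp only [List.mem_cons]
            rintro (rfl | h)
            · exact hxxs hy
            · exact hproc y (by simp [hy]) h)]
      have hpred2 : pf.filter (fun f => decide (f ∈ (x :: proc)) || decide (f ∈ xs))
          = pf.filter (fun f => decide (f ∈ proc) || decide (f ∈ (x :: xs))) := by
        apply List.filter_congr; intro f _
        simp only [List.mem_cons]
        by_cases h : f = x <;> simp [h, Bool.or_comm]
      rw [hpred2]
      simp [List.filter_cons, hxpf]
    · rw [PySem.List.insertBy_of_forall_not_before _ _ _ (by
        intro y hy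
        rcases List.mem_append.mp hy with h1 | h1
        · have hym : y ∈ pf := List.mem_of_mem_filter h1
          have : pf.idxOf y < pf.length := List.idxOf_lt_length_of_mem hym
          have hx : pf.idxOf x = pf.length := List.idxOf_eq_length hxpf
          simp only [decide_eq_false_iff_not, not_lt, hx]
          omega
        · have hy' : y ∉ pf := hN y h1
          have h1' : pf.idxOf y = pf.length := List.idxOf_eq_length hy'
          have hx : pf.idxOf x = pf.length := List.idxOf_eq_length hxpf
          simp [hx, h1'])]
      rw [List.append_assoc]
      rw [ih proc (N ++ [x]) hxs
        (by intro y hy; rcases List.mem_append.mp hy with h1 | h1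
            · exact hN y h1
            · simp only [List.mem_singleton] at h1; subst h1; exact hxpf)
        (fun y hy => hproc y (by simp [hy]))]
      have hpred : pf.filter (fun f => decide (f ∈ proc) || decide (f ∈ xs))
          = pf.filter (fun f => decide (f ∈ proc) || decide (f ∈ (x :: xs))) := by
        apply List.filter_congr; intro f hf
        have : f ≠ x := by rintro rfl; exact hxpf hf
        simp [List.mem_cons, this]
      rw [hpred]
      simp [List.filter_cons, hxpf]

-- ===== VERDICT (by name: the statement is the Claim_ definition above) =====
set_option maxHeartbeats 1000000 in
theorem get_key_fields_py_spec : Claim_equal_get_key_fields_py := by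
  intro columns _
  unfold Spec_get_key_fields_py get_key_fields_py get_key_fields_py_alt
  simp only
  -- A side: priority filter ++ first-occurrence dedup of the non-priority columns
  rw [PySem.List.foldl_append_ite_eq_filter, foldl_dedup_eq]
  simp only [List.nil_append]
  rw [show priorityFieldsA = priorityFieldsB from rfl]
  -- B side: rewrite the key to idxOf, then evaluate the stable insertion sort
  rw [show (fun c => ((PySem.List.enumerate priorityFieldsB).foldl (fun d p => d.insert p.2 p.1)
        (PySem.Dict.empty : PySem.Dict String Int)).getD c (priorityFieldsB.length : Int))
      = (fun c => (priorityFieldsB.idxOf c : Int)) from funext rank_getD]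
  rw [PySem.List.sorted_eq_foldl_insertBy]
  rw [show (fun (a b : String) => decide ((priorityFieldsB.idxOf a : Int) < (priorityFieldsB.idxOf b : Int)))
      = (fun (a b : String) => decide (priorityFieldsB.idxOf a < priorityFieldsB.idxOf b)) from by
    funext a b; simp]
  have hnodup : (PySem.List.dedup columns).Nodup := by
    rw [PySem.List.dedup_eq_ofList]; exact PySem.Set.nodup_ofList columns
  have := fold_ins priorityFieldsB (by decide) (PySem.List.dedup columns) [] []
    hnodup (by simp) (by simp)
  simp only [List.not_mem_nil, decide_false, Bool.false_or, List.nil_append, List.append_nil, List.filter_false] at this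
  rw [this]
  -- both sides are now filters of the same data
  have hmem : ∀ f, f ∈ PySem.List.dedup columns ↔ f ∈ columns := by
    intro f; rw [PySem.List.dedup_eq_ofList]; exact PySem.Set.mem_ofList columns f
  have hA : priorityFieldsB.filter (fun f => decide (f ∈ PySem.List.dedup columns))
      = priorityFieldsB.filter (fun c => decide (c ∈ columns)) := by
    apply List.filter_congr; intro x _; simp [hmem]
  rw [hA, dedup_eq_dfo,
    dfo_filter columns (priorityFieldsB.filter (fun c => decide (c ∈ columns))) []
      (by intro x hx; simp [List.mem_filter, hx])]
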